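-- pv_equiv track=rewrite | github.com/NandhikaM/CryptgraphyConcepts_CIA | Crypto_CIA.py | hash_gronsfeld_decrypt
-- ===== SOURCE A (Python) =====
-- def hash_gronsfeld_decrypt(ciphertext, key):
--
--     plaintext = ""
--     key_idx = 0
--     for char in ciphertext.upper():
--         if char.isalpha():
--             base = ord('A')
--             pos = ord(char) - base
--             shift = key[key_idx % len(key)]
--             new_pos = (pos - shift + 26) % 26
--             plaintext += chr(base + new_pos)
--             key_idx += 1
--         else:
--             plaintext += char
--     return plaintext
-- ===== SOURCE B (Python) =====
-- def hash_gronsfeld_decrypt(ciphertext, key):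
--     up = ciphertext.upper()
--     letters = [c for c in up if c.isalpha()]
--     dec = [chr(ord('A') + (ord(c) - ord('A') - key[i % len(key)] + 26) % 26)
--            for i, c in enumerate(letters)]
--     it = iter(dec)
--     return "".join(next(it) if c.isalpha() else c for c in up)
-- ===== Notes on version B (the rewrite author's own statement) =====
-- stated objective: alternative
-- what changed: Replaces A's single interleaved pass with a manually advanced key counter by a two-phase decomposition: extract the alphabetic characters, decrypt them positionally with enumerate, then merge the decrypted letters back over the non-letters via an iterator.
import Mathlib
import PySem

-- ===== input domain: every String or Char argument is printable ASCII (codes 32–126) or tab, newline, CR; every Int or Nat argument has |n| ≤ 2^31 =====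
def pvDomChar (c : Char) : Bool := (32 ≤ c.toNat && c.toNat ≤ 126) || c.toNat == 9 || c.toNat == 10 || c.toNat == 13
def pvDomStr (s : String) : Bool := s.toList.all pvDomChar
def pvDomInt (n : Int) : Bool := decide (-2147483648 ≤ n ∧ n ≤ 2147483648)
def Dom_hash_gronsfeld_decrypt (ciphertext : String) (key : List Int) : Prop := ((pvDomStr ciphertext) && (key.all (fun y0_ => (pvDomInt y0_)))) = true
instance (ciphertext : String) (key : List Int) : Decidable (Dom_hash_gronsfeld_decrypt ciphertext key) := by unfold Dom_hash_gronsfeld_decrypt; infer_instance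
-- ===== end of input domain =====

-- B decrypts in two phases (extract letters, decrypt positionally with enumerate, merge back) instead of A's single interleaved pass with a letter counter; objective: alternative decomposition, same cost.


-- ===== PORT A =====
-- A: one pass over ciphertext.upper(); key index advances only on letters.
-- key[key_idx % len(key)] is in range whenever key ≠ [] (0 ≤ mod < len), so pyGetD's
-- default 0 is never used inside Pre_ (key = [] raises ZeroDivisionError in Python).
def hash_gronsfeld_decrypt (ciphertext : String) (key : List Int) : String :=
  let r := (PySem.Chars.upper ciphertext.toList).foldl
    (fun (st : List Char × Int) c =>
      if PySem.Chars.isalpha c then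
        let base : Int := 65
        let pos : Int := (c.toNat : Int) - base
        let shift : Int := PySem.List.pyGetD key (PySem.Int.mod st.2 (key.length : Int)) 0
        let newPos : Int := PySem.Int.mod (pos - shift + 26) 26
        (st.1 ++ [Char.ofNat (base + newPos).toNat], st.2 + 1)
      else (st.1 ++ [c], st.2))
    ([], 0)
  String.ofList r.1

-- ===== PORT B =====
-- decryption of the i-th letter (the body of Source B's comprehension)
def gdLetter (key : List Int) (i : Int) (c : Char) : Char :=
  Char.ofNat ((65 : Int) + PySem.Int.mod ((c.toNat : Int) - 65 - PySem.List.pyGetD key (PySem.Int.mod i (key.length : Int)) 0 + 26) 26).toNat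

-- the merging generator: pull the next decrypted letter for each alpha char, copy the rest
def gdMerge : List Char → List Char → List Char
  | [], _ => []
  | c :: cs, ds =>
    if PySem.Chars.isalpha c then
      match ds with
      | d :: ds' => d :: gdMerge cs ds'
      | [] => gdMerge cs []
    else c :: gdMerge cs ds

def hash_gronsfeld_decrypt_alt (ciphertext : String) (key : List Int) : String :=
  let up := PySem.Chars.upper ciphertext.toList
  let letters := up.filter (fun c => PySem.Chars.isalpha c)
  let dec := (PySem.List.enumerate letters).map (fun p => gdLetter key p.1 p.2)
  String.ofList (gdMerge up dec)

-- ===== PRECONDITION & SPEC =====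
-- Pre_ excludes exactly the inputs where Python A raises ZeroDivisionError: an empty key
-- together with at least one alphabetic character (Python B raises there too).
def Pre_hash_gronsfeld_decrypt (ciphertext : String) (key : List Int) : Prop :=
  key ≠ [] ∨ ∀ c ∈ ciphertext.toList, PySem.Chars.isalpha c = false
instance (ciphertext : String) (key : List Int) : Decidable (Pre_hash_gronsfeld_decrypt ciphertext key) := by unfold Pre_hash_gronsfeld_decrypt; infer_instance

def pvWitness_hash_gronsfeld_decrypt : String × List Int := ("Bqjc, Gtnxk!", [1, 2, 3])

def Spec_hash_gronsfeld_decrypt (ciphertext : String) (key : List Int) (out : String) : Prop := out = hash_gronsfeld_decrypt_alt ciphertext key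
instance (ciphertext : String) (key : List Int) (out : String) : Decidable (Spec_hash_gronsfeld_decrypt ciphertext key out) := by unfold Spec_hash_gronsfeld_decrypt; infer_instance

-- ===== CLAIM (what is proved, stated in full; the proofs are below) =====
def Claim_equal_hash_gronsfeld_decrypt : Prop := ∀ (ciphertext : String) (key : List Int), Dom_hash_gronsfeld_decrypt ciphertext key → Pre_hash_gronsfeld_decrypt ciphertext key → Spec_hash_gronsfeld_decrypt ciphertext key (hash_gronsfeld_decrypt ciphertext key)

-- ===== LEMMAS AND PROOFS =====

-- the decrypted letters of cs, starting at key index i (proof-only reference form)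
def gdDecFrom (key : List Int) (i : Int) : List Char → List Char
  | [] => []
  | c :: cs =>
    if PySem.Chars.isalpha c then gdLetter key i c :: gdDecFrom key (i + 1) cs
    else gdDecFrom key i cs

lemma enum_map_eq_decLetters (key : List Int) :
    ∀ (ls : List Char) (i : Int), (∀ c ∈ ls, PySem.Chars.isalpha c = true) →
      (PySem.List.enumerate ls i).map (fun p => gdLetter key p.1 p.2) = gdDecFrom key i ls := by
  intro ls
  induction ls with
  | nil => intro i _; simp [PySem.List.enumerate_nil, gdDecFrom]
  | cons c cs ih =>
    intro i h
    have hc := h c (by simp)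
    simp [PySem.List.enumerate_cons, gdDecFrom, hc, ih (i + 1) (fun x hx => h x (by simp [hx]))]

lemma decFrom_filter (key : List Int) :
    ∀ (cs : List Char) (i : Int),
      gdDecFrom key i (cs.filter (fun c => PySem.Chars.isalpha c)) = gdDecFrom key i cs := by
  intro cs
  induction cs with
  | nil => intro i; simp
  | cons c cs ih =>
    intro i
    by_cases hc : PySem.Chars.isalpha c = true
    · simp [hc, gdDecFrom, ih]
    · simp [hc, gdDecFrom, ih]

lemma foldl_eq_merge (key : List Int) :
    ∀ (cs : List Char) (acc : List Char) (i : Int),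
      (cs.foldl
        (fun (st : List Char × Int) c =>
          if PySem.Chars.isalpha c then
            (st.1 ++ [Char.ofNat ((65 : Int) + PySem.Int.mod (((c.toNat : Int) - 65) - PySem.List.pyGetD key (PySem.Int.mod st.2 (key.length : Int)) 0 + 26) 26).toNat], st.2 + 1)
          else (st.1 ++ [c], st.2))
        (acc, i)).1
      = acc ++ gdMerge cs (gdDecFrom key i cs) := by
  intro cs
  induction cs with
  | nil => intro acc i; simp [gdMerge]
  | cons c cs ih =>
    intro acc i
    by_cases hc : PySem.Chars.isalpha c = true
    · rw [List.foldl_cons]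
      simp only [hc, if_true]
      rw [ih]
      simp [gdDecFrom, gdMerge, gdLetter, hc]
    · rw [List.foldl_cons]
      simp only [hc, Bool.false_eq_true, if_false]
      rw [ih]
      simp [gdDecFrom, gdMerge, hc]

-- ===== VERDICT (by name: the statement is the Claim_ definition above) =====
theorem hash_gronsfeld_decrypt_spec : Claim_equal_hash_gronsfeld_decrypt := by
  intro ciphertext key _ _
  show String.ofList
      (((PySem.Chars.upper ciphertext.toList).foldl
        (fun (st : List Char × Int) c =>
          if PySem.Chars.isalpha c then
            (st.1 ++ [Char.ofNat ((65 : Int) + PySem.Int.mod (((c.toNat : Int) - 65) - PySem.List.pyGetD key (PySem.Int.mod st.2 (key.length : Int)) 0 + 26) 26).toNat], st.2 + 1)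
          else (st.1 ++ [c], st.2))
        ([], 0)).1)
    = String.ofList (gdMerge (PySem.Chars.upper ciphertext.toList)
        ((PySem.List.enumerate ((PySem.Chars.upper ciphertext.toList).filter (fun c => PySem.Chars.isalpha c))).map (fun p => gdLetter key p.1 p.2)))
  rw [foldl_eq_merge key (PySem.Chars.upper ciphertext.toList) [] 0]
  rw [enum_map_eq_decLetters key _ 0 (by intro c hc; exact (List.mem_filter.mp hc).2)]
  rw [decFrom_filter]
  simp
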